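-- pv_equiv track=rewrite | github.com/jorlyf/ege-informatics | 22 задание/11.py | f
-- ===== SOURCE A (Python) =====
-- def f(x):
--     a = 0; b = 0
--     while x > 0:
--         if x % 2 == 0:
--             a += 1
--         else:
--             b += x % 6
--         x = x // 6
--     return a, b
-- ===== SOURCE B (Python) =====
-- def f(x):
--     digits = []
--     while x > 0:
--         digits.append(x % 6)
--         x //= 6
--     a = sum(1 for d in digits if d % 2 == 0)
--     b = sum(d for d in digits if d % 2 == 1)
--     return a, b
-- ===== Notes on version B (the rewrite author's own statement) =====
-- stated objective: simpler
-- what changed: A's single fused loop with two mutable accumulators and a parity branch on the whole remaining number is replaced by a digit-extraction pass collecting the base-six digits, then two separate filtered aggregates over the digit list (the branch tests the digit's parity, which equals the number's parity since the base is even).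
import Mathlib
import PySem

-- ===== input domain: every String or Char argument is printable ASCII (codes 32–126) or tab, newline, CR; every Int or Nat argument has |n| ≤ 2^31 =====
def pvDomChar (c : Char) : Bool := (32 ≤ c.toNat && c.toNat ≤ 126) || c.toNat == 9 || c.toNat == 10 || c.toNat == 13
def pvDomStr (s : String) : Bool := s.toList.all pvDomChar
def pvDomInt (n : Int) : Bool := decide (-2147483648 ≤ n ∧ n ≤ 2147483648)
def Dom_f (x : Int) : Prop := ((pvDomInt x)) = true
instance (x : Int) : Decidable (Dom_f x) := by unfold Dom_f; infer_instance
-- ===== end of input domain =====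

-- B replaces A's fused accumulator loop by a digit-extraction pass plus two filtered aggregates (simpler decomposition; same cost).

-- ===== PORT A =====
-- A's while-loop with accumulators a, b, transcribed as recursion on the shrinking x
def fAux (x a b : Int) : Int × Int :=
  if h : x > 0 then
    if PySem.Int.mod x 2 == 0 then
      fAux (PySem.Int.floordiv x 6) (a + 1) b
    else
      fAux (PySem.Int.floordiv x 6) a (b + PySem.Int.mod x 6)
  else (a, b)
termination_by x.toNat
decreasing_by
  all_goals
    rw [PySem.Int.floordiv_eq_ediv_of_pos (by omega : (0:Int) < 6)]; omega

def f (x : Int) : Int × Int := fAux x 0 0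

-- ===== PORT B =====
-- the digit-extraction while-loop of Source B
def pyDigits (x : Int) : List Int :=
  if h : x > 0 then
    PySem.Int.mod x 6 :: pyDigits (PySem.Int.floordiv x 6)
  else []
termination_by x.toNat
decreasing_by
  rw [PySem.Int.floordiv_eq_ediv_of_pos (by omega : (0:Int) < 6)]; omega

def f_alt (x : Int) : Int × Int :=
  let digits := pyDigits x
  (((digits.filter (fun d => PySem.Int.mod d 2 == 0)).length : Int),
   (digits.filter (fun d => PySem.Int.mod d 2 == 1)).sum)

-- ===== PRECONDITION & SPEC =====
def Spec_f (x : Int) (out : Int × Int) : Prop := out = f_alt x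
instance (x : Int) (out : Int × Int) : Decidable (Spec_f x out) := by unfold Spec_f; infer_instance

-- ===== CLAIM (what is proved, stated in full; the proofs are below) =====
def Claim_equal_f : Prop := ∀ (x : Int), Dom_f x → Spec_f x (f x)

-- ===== LEMMAS AND PROOFS =====

theorem fAux_eq (n : Nat) : ∀ (x a b : Int), x.toNat ≤ n →
    fAux x a b = (a + ((pyDigits x).filter (fun d => PySem.Int.mod d 2 == 0)).length,
                  b + ((pyDigits x).filter (fun d => PySem.Int.mod d 2 == 1)).sum) := by
  induction n with
  | zero =>
    intro x a b hx
    have hx0 : ¬ x > 0 := by omega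
    rw [fAux, pyDigits]
    simp [hx0]
  | succ n ih =>
    intro x a b hx
    by_cases h : x > 0
    · have hmod6 := PySem.Int.mod_eq_emod_of_pos (b := 6) (a := x) (by omega)
      have hmod2 := PySem.Int.mod_eq_emod_of_pos (b := 2) (a := x) (by omega)
      have hmod2' := PySem.Int.mod_eq_emod_of_pos (b := 2) (a := x % 6) (by omega)
      have hdiv6 := PySem.Int.floordiv_eq_ediv_of_pos (b := 6) (a := x) (by omega)
      have hrec : (PySem.Int.floordiv x 6).toNat ≤ n := by rw [hdiv6]; omega
      -- parity of x equals parity of its last base-6 digit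
      have hpar : x % 2 = (x % 6) % 2 := by omega
      rw [fAux, pyDigits]
      by_cases he : x % 2 = 0
      · have h6e : (x % 6) % 2 = 0 := by omega
        simp only [h, dif_pos, hmod6, hmod2, hmod2', he, h6e, List.filter_cons]
        simp only [ih _ _ _ hrec]
        simp
        omega
      · have h6e : (x % 6) % 2 = 1 := by omega
        simp only [h, dif_pos, hmod6, hmod2, hmod2', he, h6e, List.filter_cons]
        simp only [ih _ _ _ hrec]
        simp
        rw [if_neg (by omega : ¬ (2:Int) ∣ x), Int.add_assoc]
    · rw [fAux, pyDigits]
      simp [h]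

-- ===== VERDICT (by name: the statement is the Claim_ definition above) =====
theorem f_spec : Claim_equal_f := by
  intro x _
  show f x = f_alt x
  unfold f f_alt
  rw [fAux_eq x.toNat x 0 0 le_rfl]
  simp
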